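-- pv_equiv track=rewrite | github.com/mcraig10/StorageCode | ResultsAnalysisCheckGenLevelOperations.py | calcMinDown
-- ===== SOURCE A (Python) =====
-- def calcMinDown(onoffVals):
--     lastIdxWasZero,minDown = True,9999 #True at first so that in first hour, if off, not counting MDT in effect
--     for idx in range(len(onoffVals)):
--         if onoffVals[idx] == 0 and lastIdxWasZero == False:
--             if 1 in onoffVals[idx:]:
--                 distToOne = onoffVals[idx:].index(1)
--                 if distToOne<minDown: minDown = distToOne
--                 lastIdxWasZero = True
--         elif onoffVals[idx] == 1:
--             lastIdxWasZero = False
--     return minDown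
-- ===== SOURCE B (Python) =====
-- def calcMinDown(onoffVals):
--     # Single pass: when the first zero after a one appears, count elements
--     # until the next one; that count is a candidate for the minimum.
--     minDown = 9999
--     counting = False
--     run = 0
--     afterOne = False
--     for v in onoffVals:
--         if counting:
--             if v == 1:
--                 if run < minDown:
--                     minDown = run
--                 counting = False
--                 afterOne = True
--             else:
--                 run += 1
--         elif v == 1:
--             afterOne = True
--         elif v == 0 and afterOne:
--             counting = True
--             run = 1
--             afterOne = False
--     return minDown
-- ===== Notes on version B (the rewrite author's own statement) =====
-- stated objective: alternative
-- what changed: Replaced A's per-zero suffix scan ('1 in onoffVals[idx:]' plus .index(1)) by a single pass that counts the current zero-run length and closes it at the next one, so no inner scans remain.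
import Mathlib
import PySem

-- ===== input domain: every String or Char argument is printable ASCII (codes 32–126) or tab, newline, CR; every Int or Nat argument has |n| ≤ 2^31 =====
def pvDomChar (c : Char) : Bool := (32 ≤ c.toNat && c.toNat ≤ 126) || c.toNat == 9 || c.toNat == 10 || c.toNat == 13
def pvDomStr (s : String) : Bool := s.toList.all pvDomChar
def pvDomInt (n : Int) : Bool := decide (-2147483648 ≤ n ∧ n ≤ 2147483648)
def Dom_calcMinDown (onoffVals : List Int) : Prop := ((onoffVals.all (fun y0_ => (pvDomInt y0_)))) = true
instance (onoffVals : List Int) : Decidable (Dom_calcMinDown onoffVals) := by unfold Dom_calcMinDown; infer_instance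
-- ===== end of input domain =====

-- B replaces A's per-zero suffix scans ('1 in onoffVals[idx:]' + .index(1)) by one pass
-- counting the current zero-run length; objective: alternative (no inner scans).


-- ===== PORT A =====
-- A's for-loop with state (lastIdxWasZero, minDown); the recursion argument is the suffix
-- onoffVals[idx:], so '1 in onoffVals[idx:]' is membership in it and
-- onoffVals[idx:].index(1) is PySem.List.index? on it (guarded by the membership test).
def calcMinDownGoA : List Int → Bool → Int → Int
  | [], _, mn => mn
  | v :: rest, last, mn =>
    if v = 0 ∧ last = false then
      if (1 : Int) ∈ (v :: rest) then
        let distToOne : Int := (((PySem.List.index? (v :: rest) (1 : Int)).getD 0 : Nat) : Int)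
        calcMinDownGoA rest true (if distToOne < mn then distToOne else mn)
      else
        calcMinDownGoA rest last mn
    else if v = 1 then
      calcMinDownGoA rest false mn
    else
      calcMinDownGoA rest last mn

def calcMinDown (onoffVals : List Int) : Int :=
  calcMinDownGoA onoffVals true 9999

-- ===== PORT B =====
-- Source B's single pass with state (minDown, counting, run, afterOne).
def calcMinDownGoB : List Int → Int → Bool → Int → Bool → Int
  | [], mn, _, _, _ => mn
  | v :: rest, mn, counting, run, afterOne =>
    if counting then
      if v = 1 then
        calcMinDownGoB rest (if run < mn then run else mn) false run true
      else
        calcMinDownGoB rest mn true (run + 1) afterOne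
    else if v = 1 then
      calcMinDownGoB rest mn false run true
    else if v = 0 ∧ afterOne = true then
      calcMinDownGoB rest mn true 1 false
    else
      calcMinDownGoB rest mn false run afterOne


def calcMinDown_alt (onoffVals : List Int) : Int :=
  calcMinDownGoB onoffVals 9999 false 0 false

-- ===== PRECONDITION & SPEC =====
def Spec_calcMinDown (onoffVals : List Int) (out : Int) : Prop := out = calcMinDown_alt onoffVals
instance (onoffVals : List Int) (out : Int) : Decidable (Spec_calcMinDown onoffVals out) := by unfold Spec_calcMinDown; infer_instance

-- ===== CLAIM (what is proved, stated in full; the proofs are below) =====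
def Claim_equal_calcMinDown : Prop := ∀ (onoffVals : List Int), Dom_calcMinDown onoffVals → Spec_calcMinDown onoffVals (calcMinDown onoffVals)

-- ===== LEMMAS AND PROOFS =====

-- If no 1 remains, A's loop never changes minDown.
theorem calcMinDownGoA_no1 (l : List Int) : ∀ (last : Bool) (mn : Int), (1 : Int) ∉ l →
    calcMinDownGoA l last mn = mn := by
  induction l with
  | nil => intro last mn _; rfl
  | cons v rest ih =>
    intro last mn h
    have hv : v ≠ 1 := fun hv => h (by simp [hv])
    have hr : (1 : Int) ∉ rest := fun hm => h (List.mem_cons_of_mem _ hm)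
    simp only [calcMinDownGoA]
    by_cases c1 : v = 0 ∧ last = false
    · rw [if_pos c1, if_neg h]
      exact ih last mn hr
    · rw [if_neg c1, if_neg hv]
      exact ih last mn hr

theorem calcMinDownGoB_no1 (l : List Int) : ∀ (mn run : Int) (a : Bool), (1 : Int) ∉ l →
    calcMinDownGoB l mn true run a = mn := by
  induction l with
  | nil => intro mn run a _; rfl
  | cons v rest ih =>
    intro mn run a h
    have hv : v ≠ 1 := fun hv => h (by simp [hv])
    have hr : (1 : Int) ∉ rest := fun hm => h (List.mem_cons_of_mem _ hm)
    simp only [calcMinDownGoB, if_neg hv]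
    exact ih mn (run + 1) a hr

theorem calcMinDownGoA_eq_calcMinDownGoB (l : List Int) :
    (∀ (mn run : Int), calcMinDownGoA l true mn = calcMinDownGoB l mn false run false) ∧
    (∀ (mn run : Int), calcMinDownGoA l false mn = calcMinDownGoB l mn false run true) ∧
    (∀ (mn run : Int) (a : Bool), (1 : Int) ∈ l →
      calcMinDownGoA l true
          (if run + (((PySem.List.index? l (1 : Int)).getD 0 : Nat) : Int) < mn
           then run + (((PySem.List.index? l (1 : Int)).getD 0 : Nat) : Int) else mn)
        = calcMinDownGoB l mn true run a) := by
  induction l with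
  | nil =>
    exact ⟨fun mn run => rfl, fun mn run => rfl, fun mn run a h => absurd h (by simp)⟩
  | cons v rest ih =>
    obtain ⟨ih1, ih2, ih3⟩ := ih
    refine ⟨?_, ?_, ?_⟩
    · intro mn run
      by_cases hv : v = 1
      · subst hv
        simpa [calcMinDownGoA, calcMinDownGoB] using ih2 mn run
      · simpa [calcMinDownGoA, calcMinDownGoB, hv] using ih1 mn run
    · intro mn run
      by_cases hv : v = 1
      · subst hv
        simpa [calcMinDownGoA, calcMinDownGoB] using ih2 mn run
      · by_cases hv0 : v = 0
        · subst hv0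
          by_cases h1 : (1 : Int) ∈ rest
          · obtain ⟨k, hk⟩ := Option.isSome_iff_exists.mp
              ((PySem.List.index?_isSome_iff rest (1 : Int)).mpr h1)
            have hidx : PySem.List.index? ((0 : Int) :: rest) 1 = some (k + 1) := by
              rw [PySem.List.index?_cons_of_ne rest (by decide), hk]; rfl
            have := ih3 mn 1 false h1
            rw [hk] at this
            simp only [Option.getD_some] at this
            simp only [calcMinDownGoA, calcMinDownGoB, hidx, Option.getD_some]
            simpa [h1, add_comm] using this
          · simp [calcMinDownGoA, calcMinDownGoB, h1, calcMinDownGoA_no1 rest false mn h1, calcMinDownGoB_no1 rest mn 1 false h1]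
        · simpa [calcMinDownGoA, calcMinDownGoB, hv, hv0] using ih2 mn run
    · intro mn run a h
      by_cases hv : v = 1
      · subst hv
        have hidx : PySem.List.index? ((1 : Int) :: rest) 1 = some 0 :=
          PySem.List.index?_cons_self 1 rest
        simpa [calcMinDownGoA, calcMinDownGoB, hidx] using ih2 (if run < mn then run else mn) run
      · have h1 : (1 : Int) ∈ rest := by
          rcases List.mem_cons.mp h with h' | h'
          · exact absurd h'.symm hv
          · exact h'
        obtain ⟨k, hk⟩ := Option.isSome_iff_exists.mp
          ((PySem.List.index?_isSome_iff rest (1 : Int)).mpr h1)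
        have hidx : PySem.List.index? (v :: rest) 1 = some (k + 1) := by
          rw [PySem.List.index?_cons_of_ne rest hv, hk]; rfl
        have := ih3 mn (run + 1) a h1
        rw [hk] at this
        simp only [Option.getD_some] at this
        simp only [calcMinDownGoA, calcMinDownGoB, hidx, Option.getD_some]
        simpa [hv, add_assoc, add_comm, add_left_comm] using this

-- ===== VERDICT (by name: the statement is the Claim_ definition above) =====
theorem calcMinDown_spec : Claim_equal_calcMinDown := by
  intro l _
  unfold Spec_calcMinDown calcMinDown calcMinDown_alt
  exact (calcMinDownGoA_eq_calcMinDownGoB l).1 9999 0
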